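-- pv_equiv track=rewrite | github.com/Neterukun1993/Library | NumberTheory/ModularArithmetic/linear_equations.py | linear_equations
-- ===== SOURCE A (Python) =====
-- MOD = 998244353
--
-- def linear_equations(matrix, vector):
--     n = len(matrix)
--     m = len(matrix[0])
--
--     if len(vector) != n:
--         raise RuntimeError('The number of rows of the matrix and the length of the vector must be the same.')
--     if any(len(row) != m for row in matrix):
--         raise RuntimeError('The number of columns of the matrix must be the same.')
--
--     # 拡大係数行列を作成
--     A = [matrix[i] + [vector[i]] for i in range(n)]
--
--     # ピボットとして選択された列と選択されなかった列
--     pivot_cols = []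
--     no_pivot_cols = []
--
--     # 掃き出し法
--     def _gauss_jordan():
--         rank = 0
--         for col in range(m):
--             # ピボットを探す
--             pivot = -1
--             for row in range(rank, n):
--                 if A[row][col] != 0:
--                     pivot = row
--                     break
--
--             # ピボットがない場合には次の列に
--             if pivot == -1:
--                 no_pivot_cols.append(col)
--                 continue
--             pivot_cols.append(col)
--
--             # 行をスワップ
--             A[pivot], A[rank] = A[rank], A[pivot]
--
--             # ピボットの値を 1 にする
--             inv = pow(A[rank][col], MOD - 2, MOD)
--             for col2 in range(m + 1):
--                 A[rank][col2] *= inv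
--                 A[rank][col2] %= MOD
--
--             # ピボットのある列の値がすべて 0 になるように掃き出す
--             for row in range(n):
--                 if row == rank or A[row][col] == 0:
--                     continue
--                 fac = A[row][col]
--                 for col2 in range(m + 1):
--                     A[row][col2] -= A[rank][col2] * fac
--                     A[row][col2] %= MOD
--
--             rank += 1
--
--         return rank
--
--     rank = _gauss_jordan()
--     for row in range(rank, n):
--         if A[row][m] != 0:
--             # 解が存在しない場合
--             return -1, [], []
--
--     dimension = m - rank  # 解が一意の場合は 0, 解が無数に存在する場合は 1 以上
--
--     # 解を1つ求める
--     result = [0] * m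
--     for i in range(rank):
--         result[pivot_cols[i]] = A[i][m]
--
--     # 基底ベクトルを求める
--     basis_vectors = []
--
--     for i in no_pivot_cols:
--         vec = [0] * m
--         vec[i] = 1
--         for j in range(rank):
--             vec[pivot_cols[j]] = -A[j][i] % MOD
--         basis_vectors.append(vec)
--
--     return dimension, result, basis_vectors
-- ===== SOURCE B (Python) =====
-- MOD = 998244353
--
--
-- def linear_equations(matrix, vector):
--     n = len(matrix)
--     m = len(matrix[0])
--
--     if len(vector) != n:
--         raise RuntimeError('The number of rows of the matrix and the length of the vector must be the same.')
--     if any(len(row) != m for row in matrix):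
--         raise RuntimeError('The number of columns of the matrix must be the same.')
--
--     # Plain Gaussian elimination to ECHELON form only: pivot rows are frozen the
--     # moment they are created (never touched again), only the still-pending rows
--     # below are eliminated.  No reduced form is ever built; the solutions are read
--     # off later by back substitution on the triangular system.
--     done = []                      # frozen echelon pivot rows
--     pending = [row + [b] for row, b in zip(matrix, vector)]
--     pivot_cols = []
--     no_pivot_cols = []
--
--     for col in range(m):
--         k = next((i for i, r in enumerate(pending) if r[col] != 0), None)
--         if k is None:
--             no_pivot_cols.append(col)
--             continue
--         pivot_cols.append(col)
--
--         prow, rest = pending[k], pending[1:]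
--         if k > 0:
--             rest[k - 1] = pending[0]   # the skipped front row takes the pivot's slot
--
--         inv = pow(prow[col], MOD - 2, MOD)
--         prow = [x * inv % MOD for x in prow]
--         done.append(prow)
--         pending = [[(x - p * r[col]) % MOD for x, p in zip(r, prow)] if r[col] else r
--                    for r in rest]
--
--     if any(r[m] != 0 for r in pending):
--         return -1, [], []
--
--     rank = len(done)
--
--     def backsolve(rows, cols, t):
--         # value of each pivot variable when the right-hand side is column t of
--         # the echelon system, by back substitution (deepest pivot first)
--         if not rows:
--             return []
--         vs = backsolve(rows[1:], cols[1:], t)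
--         s = rows[0][t]
--         for c, v in vs:
--             s -= rows[0][c] * v
--         return [(cols[0], s % MOD)] + vs
--
--     result = [0] * m
--     for c, v in backsolve(done, pivot_cols, m):
--         result[c] = v
--
--     basis_vectors = []
--     for f in no_pivot_cols:
--         vec = [0] * m
--         vec[f] = 1
--         for c, v in backsolve(done, pivot_cols, f):
--             vec[c] = -v % MOD
--         basis_vectors.append(vec)
--
--     return m - rank, result, basis_vectors
-- ===== Notes on version B (the rewrite author's own statement) =====
-- stated objective: alternative
-- what changed: Replaces A's Gauss-Jordan (every pivot step re-eliminates all earlier pivot rows and the solutions are read off the fully reduced RREF matrix) by plain Gaussian elimination to echelon form only - pivot rows are frozen once created, only rows below are eliminated - followed by recursive back substitution on the triangular system, run once per needed right-hand column (the augmented column and each free column); no reduced matrix is ever formed.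
import Mathlib
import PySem

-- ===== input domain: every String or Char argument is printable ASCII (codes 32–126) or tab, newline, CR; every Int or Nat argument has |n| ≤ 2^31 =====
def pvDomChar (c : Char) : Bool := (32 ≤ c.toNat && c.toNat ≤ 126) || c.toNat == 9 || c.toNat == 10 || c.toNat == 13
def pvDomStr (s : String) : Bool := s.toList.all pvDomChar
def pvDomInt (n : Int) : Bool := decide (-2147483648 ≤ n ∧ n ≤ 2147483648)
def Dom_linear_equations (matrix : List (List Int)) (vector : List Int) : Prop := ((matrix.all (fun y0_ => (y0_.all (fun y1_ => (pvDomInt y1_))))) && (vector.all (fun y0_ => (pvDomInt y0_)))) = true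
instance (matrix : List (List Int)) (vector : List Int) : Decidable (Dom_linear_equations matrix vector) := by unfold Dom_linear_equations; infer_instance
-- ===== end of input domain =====

-- B replaces A's Gauss–Jordan (which keeps the whole matrix fully reduced, re-eliminating
-- every earlier pivot row at each step and reading solutions off the RREF) by plain Gaussian
-- elimination to echelon form — pivot rows are frozen once created, only rows below are
-- eliminated — followed by back substitution on the triangular system for each needed
-- right-hand column; no reduced matrix is ever built (objective: alternative).
-- Equivalence is about the return value (A mutates fresh local state only).

-- ===== PORT A =====
def pvMOD : Int := 998244353

-- pow(a, e, MOD): binary exponentiation mod pvMOD, exactly Python's 3-arg pow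
-- (canonical result in [0, pvMOD) via PySem.Int.mod; Python's own pow is binary too)
def pvPowMod (a : Int) (e : Nat) : Int :=
  if e = 0 then PySem.Int.mod 1 pvMOD
  else
    let h := pvPowMod a (e / 2)
    let h2 := PySem.Int.mod (h * h) pvMOD
    if e % 2 = 0 then h2 else PySem.Int.mod (h2 * a) pvMOD
decreasing_by exact Nat.div_lt_self (Nat.pos_of_ne_zero (by assumption)) (by norm_num)

-- A[row][col]; exact: every access in A uses nonnegative in-range indices
def pvGet2 (A : List (List Int)) (row col : Nat) : Int := (A.getD row []).getD col 0

-- the body of A's `for col in range(m)` loop (state: A, pivot_cols, no_pivot_cols, rank)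
def pvStepA (n m : Nat) (st : List (List Int) × List Nat × List Nat × Nat) (col : Nat) :
    List (List Int) × List Nat × List Nat × Nat :=
  let A := st.1; let piv := st.2.1; let nopiv := st.2.2.1; let rank := st.2.2.2
  -- pivot search with break  =  first match over rows rank..n-1
  match (List.range' rank (n - rank)).find? (fun row => pvGet2 A row col != 0) with
  | none => (A, piv, nopiv ++ [col], rank)
  | some p =>
    -- A[pivot], A[rank] = A[rank], A[pivot]
    let rowRank := A.getD rank []
    let rowP := A.getD p []
    let A1 := (A.set p rowRank).set rank rowP
    let inv := pvPowMod (pvGet2 A1 rank col) ((pvMOD - 2).toNat)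
    -- for col2 in range(m+1): A[rank][col2] = A[rank][col2] * inv % MOD
    let A2 := A1.set rank ((List.range (m + 1)).foldl
        (fun r c2 => r.set c2 (PySem.Int.mod (r.getD c2 0 * inv) pvMOD)) (A1.getD rank []))
    -- for row in range(n): eliminate (skip row == rank and zero entries)
    let A3 := (List.range n).foldl (fun B row =>
        if row = rank ∨ pvGet2 B row col = 0 then B
        else
          let fac := pvGet2 B row col
          B.set row ((List.range (m + 1)).foldl
            (fun r c2 => r.set c2 (PySem.Int.mod (r.getD c2 0 - pvGet2 B rank c2 * fac) pvMOD))
            (B.getD row []))) A2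
    (A3, piv ++ [col], nopiv, rank + 1)

def linear_equations (matrix : List (List Int)) (vector : List Int) :
    Int × List Int × List (List Int) :=
  let n := matrix.length
  let m := matrix.headI.length
  -- (the two validation checks raise in Python; those inputs are outside Pre_)
  let A0 := (List.range n).map (fun i => matrix.getD i [] ++ [vector.getD i 0])
  let st := (List.range m).foldl (pvStepA n m) (A0, [], [], 0)
  let A := st.1; let piv := st.2.1; let nopiv := st.2.2.1; let rank := st.2.2.2
  if (List.range' rank (n - rank)).any (fun row => pvGet2 A row m != 0) then
    (-1, [], [])
  else
    let dimension : Int := (m : Int) - (rank : Int)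
    let result := (List.range rank).foldl
      (fun res i => res.set (piv.getD i 0) (pvGet2 A i m)) (List.replicate m (0 : Int))
    let basis := nopiv.foldl (fun bvs i =>
      let vec := (List.replicate m (0 : Int)).set i 1
      let vec := (List.range rank).foldl
        (fun v j => v.set (piv.getD j 0) (PySem.Int.mod (-(pvGet2 A j i)) pvMOD)) vec
      bvs ++ [vec]) []
    (dimension, result, basis)

-- ===== PORT B =====
-- [x * inv % MOD for x in prow]
def pvScale (inv : Int) (r : List Int) : List Int :=
  r.map (fun x => PySem.Int.mod (x * inv) pvMOD)

-- [(x - p * r[col]) % MOD for x, p in zip(r, prow)] if r[col] else r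
def pvElimB (col : Nat) (prow : List Int) (r : List Int) : List Int :=
  let fac := r.getD col 0
  if fac = 0 then r
  else (r.zip prow).map (fun xp => PySem.Int.mod (xp.1 - xp.2 * fac) pvMOD)

-- the body of B's `for col in range(m)` loop (state: done, pending, pivot_cols, no_pivot_cols);
-- done rows are frozen: only pending rows are eliminated
def pvStepB (st : List (List Int) × List (List Int) × List Nat × List Nat) (col : Nat) :
    List (List Int) × List (List Int) × List Nat × List Nat :=
  let done := st.1; let pending := st.2.1; let piv := st.2.2.1; let nopiv := st.2.2.2
  match pending.findIdx? (fun r => r.getD col 0 != 0) with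
  | none => (done, pending, piv, nopiv ++ [col])
  | some k =>
    let prow0 := pending.getD k []
    let rest0 := pending.tail
    let rest := if 0 < k then rest0.set (k - 1) (pending.getD 0 []) else rest0
    let inv := pvPowMod (prow0.getD col 0) ((pvMOD - 2).toNat)
    let prow := pvScale inv prow0
    (done ++ [prow], rest.map (pvElimB col prow), piv ++ [col], nopiv)

-- backsolve(rows, cols, t) from Source B: back substitution, deepest pivot first
def pvBacksolve (rows : List (List Int)) (cols : List Nat) (t : Nat) : List (Nat × Int) :=
  match rows with
  | [] => []
  | r :: rest =>
    let vs := pvBacksolve rest cols.tail t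
    let s := vs.foldl (fun s cv => s - r.getD cv.1 0 * cv.2) (r.getD t 0)
    (cols.headD 0, PySem.Int.mod s pvMOD) :: vs

def linear_equations_alt (matrix : List (List Int)) (vector : List Int) :
    Int × List Int × List (List Int) :=
  let m := matrix.headI.length
  let pending0 := (matrix.zip vector).map (fun rb => rb.1 ++ [rb.2])
  let st := (List.range m).foldl pvStepB ([], pending0, [], [])
  let done := st.1; let pending := st.2.1; let piv := st.2.2.1; let nopiv := st.2.2.2
  if pending.any (fun r => r.getD m 0 != 0) then (-1, [], [])
  else
    let rank := done.length
    let dimension : Int := (m : Int) - (rank : Int)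
    let result := (pvBacksolve done piv m).foldl
      (fun res cv => res.set cv.1 cv.2) (List.replicate m (0 : Int))
    let basis := nopiv.foldl (fun bvs f =>
      let vec := (List.replicate m (0 : Int)).set f 1
      let vec := (pvBacksolve done piv f).foldl
        (fun v cv => v.set cv.1 (PySem.Int.mod (-cv.2) pvMOD)) vec
      bvs ++ [vec]) []
    (dimension, result, basis)

-- ===== PRECONDITION & SPEC =====
-- Pre_ excludes exactly the inputs where A raises: empty matrix (IndexError on
-- matrix[0]) and the two explicit RuntimeErrors (vector length ≠ row count, ragged rows).
def Pre_linear_equations (matrix : List (List Int)) (vector : List Int) : Prop :=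
  matrix ≠ [] ∧ vector.length = matrix.length ∧
    ∀ row ∈ matrix, row.length = matrix.headI.length
instance (matrix : List (List Int)) (vector : List Int) :
    Decidable (Pre_linear_equations matrix vector) := by
  unfold Pre_linear_equations; infer_instance

def pvWitness_linear_equations : List (List Int) × List Int := ([[1, 2], [0, 1]], [3, 4])

def Spec_linear_equations (matrix : List (List Int)) (vector : List Int)
    (out : Int × List Int × List (List Int)) : Prop := out = linear_equations_alt matrix vector
instance (matrix : List (List Int)) (vector : List Int)
    (out : Int × List Int × List (List Int)) : Decidable (Spec_linear_equations matrix vector out) := by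
  unfold Spec_linear_equations; infer_instance

-- ===== CLAIM (what is proved, stated in full; the proofs are below) =====
def Claim_equal_linear_equations : Prop :=
  ∀ (matrix : List (List Int)) (vector : List Int), Dom_linear_equations matrix vector →
    Pre_linear_equations matrix vector →
    Spec_linear_equations matrix vector (linear_equations matrix vector)

-- ===== LEMMAS AND PROOFS =====

-- entries lie in [0, pvMOD)
def pvCanon (r : List Int) : Prop := ∀ t, 0 ≤ r.getD t 0 ∧ r.getD t 0 < pvMOD

-- fold of eliminations by a pivot list over a starting row
def pvRrows (ps : List (Nat × List Int)) (x : List Int) : List Int :=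
  ps.foldl (fun r cd => pvElimB cd.1 cd.2 r) x

-- A's fully reduced pivot rows, expressed from B's frozen echelon rows:
-- row i is its echelon version eliminated by every later pivot, in creation order
def pvFinalRows : List (Nat × List Int) → List (List Int)
  | [] => []
  | (_, d) :: rest => pvRrows rest d :: pvFinalRows rest

-- relation between A's loop state and B's loop state
def pvRel (n m : Nat) (a : List (List Int) × List Nat × List Nat × Nat)
    (b : List (List Int) × List (List Int) × List Nat × List Nat) : Prop :=
  a.1 = pvFinalRows (b.2.2.1.zip b.1) ++ b.2.1 ∧ a.2.1 = b.2.2.1 ∧ a.2.2.1 = b.2.2.2 ∧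
    a.2.2.2 = b.1.length ∧ b.2.2.1.length = b.1.length ∧ a.1.length = n ∧
    (∀ r ∈ b.1, r.length = m + 1 ∧ pvCanon r) ∧ (∀ r ∈ b.2.1, r.length = m + 1)

theorem pv_mod_canon (x : Int) : 0 ≤ PySem.Int.mod x pvMOD ∧ PySem.Int.mod x pvMOD < pvMOD := by
  rw [PySem.Int.mod_eq_emod_of_pos (by norm_num [pvMOD])]
  exact ⟨Int.emod_nonneg _ (by norm_num [pvMOD]), Int.emod_lt_of_pos _ (by norm_num [pvMOD])⟩

theorem pv_mod_modeq (x : Int) : PySem.Int.mod x pvMOD ≡ x [ZMOD pvMOD] := by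
  rw [PySem.Int.mod_eq_emod_of_pos (by norm_num [pvMOD])]
  exact Int.emod_emod_of_dvd x dvd_rfl

-- pivot search: range' scan of done ++ pending = findIdx? on pending
theorem pv_find_eq (q : List Int → Bool) :
    ∀ (pending done : List (List Int)),
      (List.range' done.length pending.length).find? (fun row => q ((done ++ pending).getD row [])) =
        (pending.findIdx? q).map (· + done.length) := by
  intro pending
  induction pending with
  | nil => intro done; simp
  | cons r rest ih =>
    intro done
    rw [List.length_cons, List.range'_succ, List.find?_cons, List.findIdx?_cons]
    have hget : ((done ++ r :: rest).getD done.length []) = r := by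
      rw [List.getD_append_right _ _ _ _ (le_refl _)]; simp
    have := ih (done ++ [r])
    simp only [List.length_append, List.length_cons, List.length_nil] at this
    rw [List.append_assoc] at this
    simp only [List.cons_append, List.nil_append] at this
    by_cases hq : q r = true
    · simp [hq]
    · have hq' : q r = false := by simpa using hq
      simp only [hget, hq', if_false, Bool.false_eq_true]
      rw [this, Option.map_map]
      cases rest.findIdx? q <;> simp [Nat.add_comm 1]

-- any: same shape
theorem pv_any_eq (q : List Int → Bool) :
    ∀ (pending done : List (List Int)),
      (List.range' done.length pending.length).any (fun row => q ((done ++ pending).getD row [])) =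
        pending.any q := by
  intro pending
  induction pending with
  | nil => intro done; simp
  | cons r rest ih =>
    intro done
    rw [List.length_cons, List.range'_succ]
    have hget : ((done ++ r :: rest).getD done.length []) = r := by
      rw [List.getD_append_right _ _ _ _ (le_refl _)]; simp
    have := ih (done ++ [r])
    simp only [List.length_append, List.length_cons, List.length_nil] at this
    rw [List.append_assoc] at this
    simp only [List.cons_append, List.nil_append] at this
    simp only [Nat.zero_add] at this
    rw [List.any_cons, hget, this, List.any_cons]

-- index-writing fold over range k = mapIdx on the first k elements
theorem pv_foldl_set_mapIdx (g : Nat → Int → Int) :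
    ∀ (k : Nat) (r : List Int), k ≤ r.length →
      (List.range k).foldl (fun s c2 => s.set c2 (g c2 (s.getD c2 0))) r =
        (r.take k).mapIdx g ++ r.drop k := by
  intro k
  induction k with
  | zero => intro r _; simp
  | succ k ih =>
    intro r hk
    have hklt : k < r.length := hk
    rw [List.range_succ, List.foldl_append, ih r (Nat.le_of_lt hklt)]
    have hlen : ((r.take k).mapIdx g).length = k := by
      simp [List.length_mapIdx, Nat.le_of_lt hklt]
    simp only [List.foldl_cons, List.foldl_nil]
    have hgetD : ((r.take k).mapIdx g ++ r.drop k).getD k 0 = r[k] := by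
      rw [List.getD_append_right _ _ _ _ (by omega)]
      simp only [hlen, Nat.sub_self, List.getD]
      rw [List.getElem?_drop]
      simp [List.getElem?_eq_getElem hklt]
    rw [hgetD, List.set_append, if_neg (by omega)]
    rw [List.drop_eq_getElem_cons hklt]
    simp only [hlen, Nat.sub_self, List.set_cons_zero]
    rw [List.take_add_one, List.getElem?_eq_getElem hklt, List.mapIdx_append]
    simp [List.length_take, Nat.min_eq_left (Nat.le_of_lt hklt)]

theorem pv_mapIdx_eq_map_lt {α β : Type} : ∀ (l : List α) (f : Nat → α → β) (g : α → β),
    (∀ i x, i < l.length → f i x = g x) → l.mapIdx f = l.map g := by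
  intro l
  induction l with
  | nil => intro f g _; simp
  | cons a l ih =>
    intro f g h
    rw [List.mapIdx_cons, List.map_cons, h 0 a (by simp),
      ih _ g (fun i x hi => h (i + 1) x (by simpa using Nat.succ_lt_succ hi))]

-- mapIdx with an index-dependent lookup = map over the zip
theorem pv_mapIdx_zip (h : Int → Int → Int) :
    ∀ (r prow : List Int), r.length ≤ prow.length →
      r.mapIdx (fun i x => h x (prow.getD i 0)) = (r.zip prow).map (fun xp => h xp.1 xp.2) := by
  intro r
  induction r with
  | nil => intro prow _; simp
  | cons x r ih =>
    intro prow hle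
    cases prow with
    | nil => simp at hle
    | cons p prow =>
      rw [List.mapIdx_cons, List.zip_cons_cons, List.map_cons]
      simp only [List.getD, List.getElem?_cons_zero, Option.getD_some]
      congr 1
      have : (fun i x => h x ((p :: prow).getD (i + 1) 0)) = fun i x => h x (prow.getD i 0) := by
        funext i x; simp [List.getD]
      rw [show (fun i x => h x ((p :: prow)[i + 1]?.getD 0)) = fun i x => h x (prow.getD i 0) from this]
      exact ih prow (by simpa using hle)

-- the whole inner elimination loop, as one equation
theorem pv_inner_fold (prow r : List Int) (fac : Int) (m : Nat) (hr : r.length = m + 1)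
    (hp : r.length ≤ prow.length) :
    (List.range (m + 1)).foldl
        (fun s c2 => s.set c2 (PySem.Int.mod (s.getD c2 0 - prow.getD c2 0 * fac) pvMOD)) r =
      (r.zip prow).map (fun xp => PySem.Int.mod (xp.1 - xp.2 * fac) pvMOD) := by
  have h1 := pv_foldl_set_mapIdx (fun c2 x => PySem.Int.mod (x - prow.getD c2 0 * fac) pvMOD)
    (m + 1) r (le_of_eq hr.symm)
  simp only [] at h1
  rw [h1, List.take_of_length_le (le_of_eq hr), List.drop_eq_nil_of_le (le_of_eq hr),
    List.append_nil]
  have h2 := pv_mapIdx_zip (fun x p => PySem.Int.mod (x - p * fac) pvMOD) r prow hp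
  simp only [] at h2
  exact h2

-- the scaling loop, as one equation
theorem pv_scale_fold (inv : Int) (r : List Int) (m : Nat) (hr : r.length = m + 1) :
    (List.range (m + 1)).foldl
        (fun s c2 => s.set c2 (PySem.Int.mod (s.getD c2 0 * inv) pvMOD)) r = pvScale inv r := by
  have h1 := pv_foldl_set_mapIdx (fun _ x => PySem.Int.mod (x * inv) pvMOD)
    (m + 1) r (le_of_eq hr.symm)
  simp only [] at h1
  rw [h1, List.take_of_length_le (le_of_eq hr), List.drop_eq_nil_of_le (le_of_eq hr),
    List.append_nil]
  exact pv_mapIdx_eq_map_lt r _ _ (fun i x _ => rfl)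

theorem pvElimB_length (col : Nat) (prow r : List Int) (h : r.length ≤ prow.length) :
    (pvElimB col prow r).length = r.length := by
  simp only [pvElimB]
  split
  · rfl
  · simp [List.length_zip, Nat.min_eq_left h]

-- fold over range with getD-indexing of two parallel lists = fold over zip
theorem pv_foldl_range_zip {α : Type} (f : α → Nat → List Int → α) :
    ∀ (xs : List Nat) (ys : List (List Int)) (acc : α), xs.length = ys.length →
      (List.range xs.length).foldl (fun a i => f a (xs.getD i 0) (ys.getD i [])) acc =
        (xs.zip ys).foldl (fun a p => f a p.1 p.2) acc := by
  intro xs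
  induction xs with
  | nil => intro ys acc _; simp
  | cons x xs ih =>
    intro ys acc hlen
    cases ys with
    | nil => simp at hlen
    | cons y ys =>
      rw [List.length_cons, List.range_succ_eq_map, List.foldl_cons, List.foldl_map,
        List.zip_cons_cons, List.foldl_cons]
      simp only [List.getD, List.getElem?_cons_zero, Option.getD_some]
      have := ih ys (f acc x y) (by simpa using hlen)
      rw [← this]
      rfl

-- map over range with getD-indexing of two parallel lists = map over the zip
theorem pv_map_range_zip {gamma : Type} (g : List Int → Int → gamma) :
    ∀ (xs : List (List Int)) (ys : List Int), xs.length = ys.length →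
      (List.range xs.length).map (fun i => g (xs.getD i []) (ys.getD i 0)) =
        (xs.zip ys).map (fun p => g p.1 p.2) := by
  intro xs
  induction xs with
  | nil => intro ys _; simp
  | cons x xs ih =>
    intro ys hlen
    cases ys with
    | nil => simp at hlen
    | cons y ys =>
      rw [List.length_cons, List.range_succ_eq_map, List.map_cons, List.map_map,
        List.zip_cons_cons, List.map_cons]
      simp only [List.getD, List.getElem?_cons_zero, Option.getD_some]
      congr 1
      have := ih ys (by simpa using hlen)
      rw [← this]
      rfl

-- A's elimination sweep over the first k rows: rows below k untouched, pivot row kept,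
-- every other processed row replaced by pvElimB with the (stable) pivot row
theorem pv_elim_fold (rank col m : Nat) :
    ∀ (k : Nat) (A2 : List (List Int)) (prow : List Int), k ≤ A2.length →
      rank < A2.length → A2.getD rank [] = prow → (∀ r ∈ A2, r.length = m + 1) →
      (List.range k).foldl (fun B row =>
          if row = rank ∨ pvGet2 B row col = 0 then B
          else
            let fac := pvGet2 B row col
            B.set row ((List.range (m + 1)).foldl
              (fun r c2 => r.set c2 (PySem.Int.mod (r.getD c2 0 - pvGet2 B rank c2 * fac) pvMOD))
              (B.getD row []))) A2 =
        (A2.take k).mapIdx (fun i r => if i = rank then r else pvElimB col prow r) ++ A2.drop k := by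
  intro k
  induction k with
  | zero => intro A2 prow _ _ _ _; simp
  | succ k ih =>
    intro A2 prow hk hrank hprow hrows
    have hklt : k < A2.length := hk
    rw [show List.range (k+1) = List.range k ++ [k] from List.range_succ, List.foldl_append,
      ih A2 prow (Nat.le_of_lt hklt) hrank hprow hrows]
    simp only [List.foldl_cons, List.foldl_nil]
    have hlen1 : ((A2.take k).mapIdx (fun i r => if i = rank then r else pvElimB col prow r)).length = k := by
      simp [Nat.le_of_lt hklt]
    have hdropS : ∀ j, k ≤ j →
        ((A2.take k).mapIdx (fun i r => if i = rank then r else pvElimB col prow r) ++ A2.drop k).getD j []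
          = A2.getD j [] := by
      intro j hj
      rw [List.getD_append_right _ _ _ _ (le_trans (le_of_eq hlen1) hj)]
      simp only [hlen1, List.getD]
      rw [List.getElem?_drop, show k + (j - k) = j from by omega]
    have hSrank : ((A2.take k).mapIdx (fun i r => if i = rank then r else pvElimB col prow r) ++ A2.drop k).getD rank []
        = prow := by
      by_cases hrk : k ≤ rank
      · rw [hdropS rank hrk, hprow]
      · have hrlt : rank < (List.mapIdx (fun i r => if i = rank then r else pvElimB col prow r) (List.take k A2)).length := by
          rw [hlen1]; omega
        rw [List.getD_append _ _ _ _ hrlt]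
        have h1 : (List.mapIdx (fun i r => if i = rank then r else pvElimB col prow r) (List.take k A2)).getD rank []
            = A2[rank]'hrank := by
          rw [List.getD_eq_getElem _ _ hrlt]
          simp [List.getElem_mapIdx, List.getElem_take]
        rw [h1, ← List.getD_eq_getElem _ _ hrank, hprow]
    have hSk : ((A2.take k).mapIdx (fun i r => if i = rank then r else pvElimB col prow r) ++ A2.drop k).getD k []
        = A2.getD k [] := hdropS k (le_refl k)
    have hRHS : (A2.take (k + 1)).mapIdx (fun i r => if i = rank then r else pvElimB col prow r) ++ A2.drop (k + 1)
        = (A2.take k).mapIdx (fun i r => if i = rank then r else pvElimB col prow r) ++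
            (if k = rank then A2[k] else pvElimB col prow A2[k]) :: A2.drop (k + 1) := by
      rw [List.take_add_one, List.getElem?_eq_getElem hklt, List.mapIdx_append]
      simp [List.length_take, Nat.min_eq_left (Nat.le_of_lt hklt)]
    have hgetk : A2.getD k [] = A2[k] := List.getD_eq_getElem _ _ hklt
    have hprowlen : prow.length = m + 1 := by
      rw [← hprow, List.getD_eq_getElem _ _ hrank]
      exact hrows _ (List.getElem_mem hrank)
    by_cases hkr : k = rank
    · rw [if_pos (Or.inl hkr), hRHS, if_pos hkr]
      rw [List.drop_eq_getElem_cons hklt]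
    · have hget2S : pvGet2 ((A2.take k).mapIdx (fun i r => if i = rank then r else pvElimB col prow r) ++ A2.drop k) k col
          = (A2.getD k []).getD col 0 := by
        unfold pvGet2; rw [hSk]
      by_cases hfac : (A2.getD k []).getD col 0 = 0
      · rw [if_pos (Or.inr (by rw [hget2S]; exact hfac))]
        rw [hRHS, if_neg hkr]
        have : pvElimB col prow A2[k] = A2[k] := by
          unfold pvElimB
          rw [← hgetk, if_pos hfac]
        rw [this, List.drop_eq_getElem_cons hklt]
      · rw [if_neg (by simp only [hkr, false_or, hget2S]; exact hfac)]
        have hklen : (A2.getD k []).length = m + 1 := by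
          rw [hgetk]; exact hrows _ (List.getElem_mem hklt)
        have hfun : (fun (r : List Int) (c2 : Nat) => r.set c2 (PySem.Int.mod (r.getD c2 0 -
              pvGet2 ((A2.take k).mapIdx (fun i r => if i = rank then r else pvElimB col prow r) ++ A2.drop k) rank c2 *
              pvGet2 ((A2.take k).mapIdx (fun i r => if i = rank then r else pvElimB col prow r) ++ A2.drop k) k col) pvMOD))
            = fun (r : List Int) (c2 : Nat) => r.set c2 (PySem.Int.mod (r.getD c2 0 -
              prow.getD c2 0 * (A2.getD k []).getD col 0) pvMOD) := by
          funext r c2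
          unfold pvGet2
          rw [hSrank, hSk]
        rw [hSk, hfun, pv_inner_fold prow (A2.getD k []) ((A2.getD k []).getD col 0) m hklen
          (by rw [hklen, hprowlen])]
        have hset : pvElimB col prow (A2.getD k []) =
            (((A2.getD k []).zip prow).map (fun xp => PySem.Int.mod (xp.1 - xp.2 * (A2.getD k []).getD col 0) pvMOD)) := by
          simp only [pvElimB, if_neg hfac]
        rw [← hset, hRHS, if_neg hkr, List.set_append, if_neg (by omega), hlen1, Nat.sub_self,
          List.drop_eq_getElem_cons hklt, List.set_cons_zero, hgetk]

theorem pvFinalRows_length : ∀ (ps : List (Nat × List Int)), (pvFinalRows ps).length = ps.length := by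
  intro ps
  induction ps with
  | nil => rfl
  | cons cd rest ih =>
    obtain ⟨c, d⟩ := cd
    simp [pvFinalRows, ih]

-- appending a new pivot: every reduced row gets one more elimination, the new row is itself
theorem pvFinalRows_snoc (c : Nat) (p : List Int) :
    ∀ (ps : List (Nat × List Int)),
      pvFinalRows (ps ++ [(c, p)]) = (pvFinalRows ps).map (pvElimB c p) ++ [p] := by
  intro ps
  induction ps with
  | nil => simp [pvFinalRows, pvRrows]
  | cons cd rest ih =>
    obtain ⟨c0, d0⟩ := cd
    simp only [List.cons_append, pvFinalRows, ih, pvRrows, List.foldl_append, List.foldl_cons,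
      List.foldl_nil, List.map_cons]

theorem pvScale_length (inv : Int) (r : List Int) : (pvScale inv r).length = r.length := by
  simp [pvScale]

theorem pvScale_canon (inv : Int) (r : List Int) : pvCanon (pvScale inv r) := by
  intro t
  by_cases ht : t < r.length
  · have : (pvScale inv r).getD t 0 = PySem.Int.mod (r[t] * inv) pvMOD := by
      simp [pvScale, List.getD, List.getElem?_eq_getElem, ht]
    rw [this]; exact pv_mod_canon _
  · have : (pvScale inv r).getD t 0 = 0 := by
      rw [List.getD_eq_default]
      rw [pvScale_length]; omega
    rw [this]; exact ⟨le_refl 0, by norm_num [pvMOD]⟩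

theorem pvRrows_length (L : Nat) : ∀ (ps : List (Nat × List Int)) (x : List Int),
    (∀ p ∈ ps, p.2.length = L) → x.length = L → (pvRrows ps x).length = L := by
  intro ps
  induction ps with
  | nil => intro x _ hx; exact hx
  | cons cd rest ih =>
    intro x hps hx
    simp only [pvRrows, List.foldl_cons]
    exact ih _ (fun p hp => hps p (List.mem_cons_of_mem _ hp))
      (by rw [pvElimB_length _ _ _ (by rw [hx, hps cd List.mem_cons_self])]; exact hx)

theorem pvFinalRows_rows (L : Nat) : ∀ (ps : List (Nat × List Int)),
    (∀ p ∈ ps, p.2.length = L) → ∀ r ∈ pvFinalRows ps, r.length = L := by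
  intro ps
  induction ps with
  | nil => intro _ r hr; simp [pvFinalRows] at hr
  | cons cd rest ih =>
    intro hps r hr
    obtain ⟨c0, d0⟩ := cd
    rcases List.mem_cons.mp hr with hr | hr
    · rw [hr]
      exact pvRrows_length L rest d0 (fun p hp => hps p (List.mem_cons_of_mem _ hp))
        (hps (c0, d0) List.mem_cons_self)
    · exact ih (fun p hp => hps p (List.mem_cons_of_mem _ hp)) r hr

-- one column step preserves pvRel
theorem pv_step (n m col : Nat) (a : List (List Int) × List Nat × List Nat × Nat)
    (b : List (List Int) × List (List Int) × List Nat × List Nat) (h : pvRel n m a b) :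
    pvRel n m (pvStepA n m a col) (pvStepB b col) := by
  obtain ⟨A, piv, nopiv, rank⟩ := a
  obtain ⟨done, pending, piv, nopiv⟩ := b
  obtain ⟨hA, hpiv, hnopiv, hrank, hpivlen, hn, hdonefacts, hpendlen⟩ := h
  simp only at hA hpiv hnopiv hrank hpivlen hn hdonefacts hpendlen
  subst hA hpiv hnopiv hrank
  set Adone := pvFinalRows (piv.zip done) with hAdone
  have hAdlen : Adone.length = done.length := by
    rw [hAdone, pvFinalRows_length, List.length_zip, hpivlen, Nat.min_self]
  have hnsub : n - done.length = pending.length := by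
    rw [← hn]; simp [hAdlen]
  have hfind := pv_find_eq (fun r => r.getD col 0 != 0) pending Adone
  rw [hAdlen] at hfind
  cases hk : pending.findIdx? (fun r => r.getD col 0 != 0) with
  | none =>
    rw [hk] at hfind
    simp only [pvStepA, pvStepB, pvGet2, hnsub, hfind, hk, Option.map_none]
    exact ⟨rfl, rfl, rfl, rfl, hpivlen, hn, hdonefacts, hpendlen⟩
  | some k =>
    rw [hk] at hfind
    have hklt : k < pending.length := (List.findIdx?_eq_some_iff_findIdx_eq.mp hk).1
    obtain ⟨r0, rest0⟩ : ∃ r0 rest0, pending = r0 :: rest0 := by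
      cases pending with
      | nil => simp at hklt
      | cons r0 rest0 => exact ⟨r0, rest0, rfl⟩
    obtain ⟨rest0, rfl⟩ := rest0
    simp only [pvStepA, pvStepB, pvGet2, hnsub, hfind, hk, Option.map_some]
    set prow0 := (r0 :: rest0).getD k [] with hprow0
    set rest : List (List Int) := if 0 < k then rest0.set (k - 1) ((r0 :: rest0).getD 0 []) else rest0 with hrest
    have hget0 : (Adone ++ r0 :: rest0).getD Adone.length [] = (r0 :: rest0).getD 0 [] := by
      rw [List.getD_append_right _ _ _ _ (le_refl _), Nat.sub_self]
    have hgetP : (Adone ++ r0 :: rest0).getD (k + Adone.length) [] = prow0 := by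
      rw [List.getD_append_right _ _ _ _ (Nat.le_add_left _ _), Nat.add_sub_cancel]
    rw [← hAdlen] at *
    have hAdlen2 : Adone.length = done.length := by
      rw [hAdone, pvFinalRows_length, List.length_zip, hpivlen, Nat.min_self]
    have hswap : ((Adone ++ r0 :: rest0).set (k + Adone.length) ((Adone ++ r0 :: rest0).getD Adone.length [])).set
        Adone.length ((Adone ++ r0 :: rest0).getD (k + Adone.length) []) = Adone ++ prow0 :: rest := by
      rw [hget0, hgetP, List.set_append, if_neg (by omega), Nat.add_sub_cancel,
        List.set_append, if_neg (by omega), Nat.sub_self]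
      congr 1
      cases k with
      | zero => simp [hrest, hprow0]
      | succ j =>
        simp only [hrest, hprow0, List.set_cons_succ, List.set_cons_zero]
        simp [List.getD]
    rw [hswap]
    simp only [List.tail_cons, ← hrest]
    have hgetrank : (Adone ++ prow0 :: rest).getD Adone.length [] = prow0 := by
      rw [List.getD_append_right _ _ _ _ (le_refl _), Nat.sub_self]; rfl
    rw [hgetrank]
    have hprow0len : prow0.length = m + 1 := by
      apply hpendlen
      rw [hprow0, List.getD_eq_getElem _ _ hklt]
      exact List.getElem_mem hklt
    rw [pv_scale_fold _ prow0 m hprow0len]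
    set prow := pvScale (pvPowMod (prow0.getD col 0) (pvMOD - 2).toNat) prow0 with hprowdef
    have hprowlen : prow.length = m + 1 := by
      rw [hprowdef, pvScale_length, hprow0len]
    rw [List.set_append, if_neg (by omega), Nat.sub_self, List.set_cons_zero]
    have hrestlen : rest.length = rest0.length := by
      rw [hrest]; split <;> simp
    have hA2len : (Adone ++ prow :: rest).length = n := by
      rw [← hn]; simp [hrestlen]
    have hrestrows : ∀ r ∈ rest, r.length = m + 1 := by
      intro r hr
      rw [hrest] at hr
      have hr' : r ∈ rest0 ∨ r = (r0 :: rest0).getD 0 [] := by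
        by_cases h0 : 0 < k
        · rw [if_pos h0] at hr
          exact List.mem_or_eq_of_mem_set hr
        · rw [if_neg h0] at hr
          exact Or.inl hr
      rcases hr' with hr' | hr'
      · exact hpendlen r (List.mem_cons_of_mem _ hr')
      · rw [hr']
        exact hpendlen _ List.mem_cons_self
    have hAdonerows : ∀ r ∈ Adone, r.length = m + 1 := by
      rw [hAdone]
      exact pvFinalRows_rows (m + 1) _ (fun p hp => (hdonefacts p.2 (List.of_mem_zip hp).2).1)
    have hrowsA2 : ∀ r ∈ Adone ++ prow :: rest, r.length = m + 1 := by
      intro r hr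
      rcases List.mem_append.mp hr with hr | hr
      · exact hAdonerows r hr
      · rcases List.mem_cons.mp hr with hr | hr
        · rw [hr]; exact hprowlen
        · exact hrestrows r hr
    have hgetrank2 : (Adone ++ prow :: rest).getD Adone.length [] = prow := by
      rw [List.getD_append_right _ _ _ _ (le_refl _), Nat.sub_self]; rfl
    have helim := pv_elim_fold Adone.length col m n (Adone ++ prow :: rest) prow
      (le_of_eq hA2len.symm) (by simp) hgetrank2 hrowsA2
    simp only [pvGet2] at helim
    rw [helim, List.take_of_length_le (le_of_eq hA2len), List.drop_eq_nil_of_le (le_of_eq hA2len),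
      List.append_nil, List.mapIdx_append, List.mapIdx_cons]
    rw [pv_mapIdx_eq_map_lt Adone _ (pvElimB col prow) (fun i x hi => if_neg (by omega))]
    rw [pv_mapIdx_eq_map_lt rest _ (pvElimB col prow) (fun i x hi => if_neg (by omega))]
    simp only [Nat.zero_add, if_pos]
    refine ⟨?_, rfl, rfl, by simp [hAdlen2], by simp [hpivlen, hAdlen2], ?_, ?_, ?_⟩
    · -- A's new rows = pvFinalRows of the extended pivot list ++ new pending
      have hzip : (piv ++ [col]).zip (done ++ [prow]) = piv.zip done ++ [(col, prow)] := by
        rw [List.zip_append hpivlen]; rfl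
      rw [hzip, pvFinalRows_snoc, ← hAdone]
      simp
    · simp only [List.length_append, List.length_map, List.length_cons, List.length_nil]
      rw [← hA2len]; simp [hrestlen]
    · intro r hr
      rcases List.mem_append.mp hr with hr | hr
      · exact hdonefacts r hr
      · rcases List.mem_cons.mp hr with hr | hr
        · rw [hr]
          exact ⟨hprowlen, hprowdef ▸ pvScale_canon _ _⟩
        · simp at hr
    · intro r hr
      obtain ⟨d, hd, rfl⟩ := List.mem_map.mp hr
      rw [pvElimB_length col prow d (by rw [hrestrows d hd, hprowlen])]
      exact hrestrows d hd

theorem pv_fold_rel (n m : Nat) (cols : List Nat)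
    (a : List (List Int) × List Nat × List Nat × Nat)
    (b : List (List Int) × List (List Int) × List Nat × List Nat) (h : pvRel n m a b) :
    pvRel n m (cols.foldl (pvStepA n m) a) (cols.foldl pvStepB b) := by
  induction cols generalizing a b with
  | nil => exact h
  | cons c cs ih => exact ih _ _ (pv_step n m c a b h)

-- ===== the back-substitution values are exactly A's reduced entries =====

-- entry congruence for one elimination
theorem pvElimB_entry (c : Nat) (prow r : List Int) (t : Nat) (hlen : r.length = prow.length) :
    (pvElimB c prow r).getD t 0 ≡ r.getD t 0 - prow.getD t 0 * r.getD c 0 [ZMOD pvMOD] := by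
  simp only [pvElimB]
  split
  · rename_i h0
    rw [h0, mul_zero, sub_zero]
  · have hzlen : (r.zip prow).length = r.length := by simp [List.length_zip, hlen]
    by_cases ht : t < r.length
    · have hz : (r.zip prow)[t]? = some ((r.zip prow)[t]'(by omega)) :=
        List.getElem?_eq_getElem (by omega)
      have hL : ((r.zip prow).map (fun xp => PySem.Int.mod (xp.1 - xp.2 * r.getD c 0) pvMOD)).getD t 0
          = PySem.Int.mod (r[t] - prow[t]'(by omega) * r.getD c 0) pvMOD := by
        simp only [List.getD, List.getElem?_map, hz, Option.map_some, Option.getD_some,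
          List.getElem_zip]
      rw [hL, List.getD_eq_getElem r _ ht, List.getD_eq_getElem prow _ (by omega)]
      exact pv_mod_modeq _
    · rw [List.getD_eq_default _ _ (by rw [List.length_map, hzlen]; omega),
        List.getD_eq_default r _ (by omega), List.getD_eq_default prow _ (by omega)]
      simp

-- sums of pointwise-congruent maps are congruent
theorem pv_sum_modeq {α : Type} (l : List α) (f g : α → Int)
    (h : ∀ a ∈ l, f a ≡ g a [ZMOD pvMOD]) : (l.map f).sum ≡ (l.map g).sum [ZMOD pvMOD] := by
  induction l with
  | nil => rfl
  | cons a l ih =>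
    simp only [List.map_cons, List.sum_cons]
    exact (h a List.mem_cons_self).add (ih (fun a ha => h a (List.mem_cons_of_mem _ ha)))

-- Σ (f - c·g) = Σ f - c·Σ g
theorem pv_sum_sub_mul {α : Type} (l : List α) (f g : α → Int) (c : Int) :
    (l.map (fun a => f a - c * g a)).sum = (l.map f).sum - c * (l.map g).sum := by
  induction l with
  | nil => simp
  | cons a l ih => simp only [List.map_cons, List.sum_cons, ih]; ring

-- the key identity: a forward-eliminated row, entrywise, is the original row minus the
-- linear combination of the FINAL reduced rows weighted by the original pivot-column entries
theorem pv_Rrows_entry (L : Nat) :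
    ∀ (ps : List (Nat × List Int)) (x : List Int) (t : Nat),
      (∀ p ∈ ps, p.2.length = L) → x.length = L →
      (pvRrows ps x).getD t 0 ≡
        x.getD t 0 - ((ps.zip (pvFinalRows ps)).map
          (fun pr => x.getD pr.1.1 0 * pr.2.getD t 0)).sum [ZMOD pvMOD] := by
  intro ps
  induction ps with
  | nil =>
    intro x t _ _
    simp only [pvRrows, List.foldl_nil, pvFinalRows, List.zip_nil_right, List.map_nil,
      List.sum_nil, sub_zero]
    exact Int.ModEq.refl _
  | cons cd rest ih =>
    intro x t hps hx
    obtain ⟨c, d⟩ := cd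
    have hd : d.length = L := hps (c, d) List.mem_cons_self
    have hrest : ∀ p ∈ rest, p.2.length = L := fun p hp => hps p (List.mem_cons_of_mem _ hp)
    have hx' : (pvElimB c d x).length = L := by
      rw [pvElimB_length c d x (by rw [hx, hd])]; exact hx
    have hlenxd : x.length = d.length := by rw [hx, hd]
    -- abbreviations
    set Rh := pvRrows rest d with hRh
    set xc := x.getD c 0 with hxc
    have hzipc : ((c, d) :: rest).zip (pvFinalRows ((c, d) :: rest))
        = ((c, d), Rh) :: rest.zip (pvFinalRows rest) := by
      simp [pvFinalRows, hRh]
    rw [show pvRrows ((c, d) :: rest) x = pvRrows rest (pvElimB c d x) from rfl, hzipc]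
    simp only [List.map_cons, List.sum_cons]
    have ihx := ih (pvElimB c d x) t hrest hx'
    have ihd := ih d t hrest hd
    -- Σ over rest with the eliminated row's coefficients, rewritten
    have hsum : ((rest.zip (pvFinalRows rest)).map
          (fun pr => (pvElimB c d x).getD pr.1.1 0 * pr.2.getD t 0)).sum ≡
        ((rest.zip (pvFinalRows rest)).map
          (fun pr => x.getD pr.1.1 0 * pr.2.getD t 0)).sum -
        xc * ((rest.zip (pvFinalRows rest)).map
          (fun pr => d.getD pr.1.1 0 * pr.2.getD t 0)).sum [ZMOD pvMOD] := by
      have h1 := pv_sum_modeq (rest.zip (pvFinalRows rest))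
        (fun pr => (pvElimB c d x).getD pr.1.1 0 * pr.2.getD t 0)
        (fun pr => (x.getD pr.1.1 0 - d.getD pr.1.1 0 * xc) * pr.2.getD t 0)
        (fun pr _ => (pvElimB_entry c d x pr.1.1 hlenxd).mul_right _)
      have h2 : ((rest.zip (pvFinalRows rest)).map
            (fun pr => (x.getD pr.1.1 0 - d.getD pr.1.1 0 * xc) * pr.2.getD t 0)).sum =
          ((rest.zip (pvFinalRows rest)).map
            (fun pr => x.getD pr.1.1 0 * pr.2.getD t 0)).sum -
          xc * ((rest.zip (pvFinalRows rest)).map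
            (fun pr => d.getD pr.1.1 0 * pr.2.getD t 0)).sum := by
        rw [← pv_sum_sub_mul]
        exact congrArg List.sum (List.map_congr_left (fun pr _ => by ring))
      rw [← h2]
      exact h1
    calc (pvRrows rest (pvElimB c d x)).getD t 0
        ≡ (pvElimB c d x).getD t 0 - ((rest.zip (pvFinalRows rest)).map
            (fun pr => (pvElimB c d x).getD pr.1.1 0 * pr.2.getD t 0)).sum [ZMOD pvMOD] := ihx
      _ ≡ (x.getD t 0 - d.getD t 0 * xc) -
            (((rest.zip (pvFinalRows rest)).map
              (fun pr => x.getD pr.1.1 0 * pr.2.getD t 0)).sum -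
             xc * ((rest.zip (pvFinalRows rest)).map
              (fun pr => d.getD pr.1.1 0 * pr.2.getD t 0)).sum) [ZMOD pvMOD] :=
          (pvElimB_entry c d x t hlenxd).sub hsum
      _ = (x.getD t 0 - ((rest.zip (pvFinalRows rest)).map
            (fun pr => x.getD pr.1.1 0 * pr.2.getD t 0)).sum) -
          xc * (d.getD t 0 - ((rest.zip (pvFinalRows rest)).map
            (fun pr => d.getD pr.1.1 0 * pr.2.getD t 0)).sum) := by ring
      _ ≡ (x.getD t 0 - ((rest.zip (pvFinalRows rest)).map
            (fun pr => x.getD pr.1.1 0 * pr.2.getD t 0)).sum) -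
          xc * Rh.getD t 0 [ZMOD pvMOD] := (Int.ModEq.refl _).sub (ihd.symm.mul_left xc)
      _ = x.getD t 0 - (xc * Rh.getD t 0 + ((rest.zip (pvFinalRows rest)).map
            (fun pr => x.getD pr.1.1 0 * pr.2.getD t 0)).sum) := by ring

theorem pvElimB_canon (c : Nat) (prow r : List Int) (h : pvCanon r) : pvCanon (pvElimB c prow r) := by
  intro t
  simp only [pvElimB]
  split
  · exact h t
  · by_cases ht : t < (r.zip prow).length
    · have hz : (r.zip prow)[t]? = some ((r.zip prow)[t]) := List.getElem?_eq_getElem ht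
      have : ((r.zip prow).map (fun xp => PySem.Int.mod (xp.1 - xp.2 * r.getD c 0) pvMOD)).getD t 0
          = PySem.Int.mod ((r.zip prow)[t].1 - (r.zip prow)[t].2 * r.getD c 0) pvMOD := by
        simp only [List.getD, List.getElem?_map, hz, Option.map_some, Option.getD_some]
      rw [this]; exact pv_mod_canon _
    · rw [List.getD_eq_default]
      · exact ⟨le_refl 0, by norm_num [pvMOD]⟩
      · rw [List.length_map]; omega

theorem pvRrows_canon (ps : List (Nat × List Int)) (x : List Int) (h : pvCanon x) :
    pvCanon (pvRrows ps x) := by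
  induction ps generalizing x with
  | nil => exact h
  | cons cd rest ih => exact ih _ (pvElimB_canon _ _ _ h)

-- a - Σ f = foldl subtraction
theorem pv_foldl_sub {α : Type} (l : List α) (f : α → Int) (init : Int) :
    l.foldl (fun s a => s - f a) init = init - (l.map f).sum := by
  induction l generalizing init with
  | nil => simp
  | cons a l ih => rw [List.foldl_cons, ih, List.map_cons, List.sum_cons]; ring

-- zips sharing their first components give the same map-sums
theorem pv_zip_zip_map {α β γ δ : Type} (g : α → γ → δ) :
    ∀ (u : List α) (v : List β) (w : List γ), u.length = v.length →
      ((u.zip v).zip w).map (fun p => g p.1.1 p.2) = (u.zip w).map (fun p => g p.1 p.2) := by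
  intro u
  induction u with
  | nil => intro v w _; simp
  | cons a u ih =>
    intro v w hlen
    cases v with
    | nil => simp at hlen
    | cons b v =>
      cases w with
      | nil => simp
      | cons cc w =>
        simp only [List.zip_cons_cons, List.map_cons]
        rw [ih v w (by simpa using hlen)]

-- back substitution computes exactly the entries of the reduced rows
theorem pv_backsolve_eq (L : Nat) :
    ∀ (done : List (List Int)) (piv : List Nat) (t : Nat),
      piv.length = done.length → (∀ r ∈ done, r.length = L ∧ pvCanon r) →
      pvBacksolve done piv t =
        (piv.zip (pvFinalRows (piv.zip done))).map (fun cR => (cR.1, cR.2.getD t 0)) := by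
  intro done
  induction done with
  | nil =>
    intro piv t hlen _
    have : piv = [] := List.length_eq_zero_iff.mp (by simpa using hlen)
    subst this
    simp [pvBacksolve, pvFinalRows]
  | cons d rest ih =>
    intro piv t hlen hrows
    cases piv with
    | nil => simp at hlen
    | cons c pcs =>
      have hpcs : pcs.length = rest.length := by simpa using hlen
      have hrest : ∀ r ∈ rest, r.length = L ∧ pvCanon r :=
        fun r hr => hrows r (List.mem_cons_of_mem _ hr)
      have hdfacts := hrows d List.mem_cons_self
      have hps : ∀ p ∈ pcs.zip rest, p.2.length = L :=
        fun p hp => (hrest p.2 (List.of_mem_zip hp).2).1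
      set Rh := pvRrows (pcs.zip rest) d with hRh
      have hihl := ih pcs t hpcs hrest
      have hzipc : (c :: pcs).zip (pvFinalRows ((c :: pcs).zip (d :: rest)))
          = (c, Rh) :: pcs.zip (pvFinalRows (pcs.zip rest)) := by
        simp [pvFinalRows, hRh]
      rw [hzipc]
      simp only [pvBacksolve, List.tail_cons, List.headD_cons, List.map_cons, hihl]
      congr 1
      -- head value: the back-substituted value is the reduced row's entry
      rw [pv_foldl_sub]
      have hmm : ((pvFinalRows (pcs.zip rest)).length) = (pcs.zip rest).length :=
        pvFinalRows_length _
      have htz := pv_zip_zip_map (fun (cc : Nat) (R : List Int) => d.getD cc 0 * R.getD t 0)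
        pcs rest (pvFinalRows (pcs.zip rest)) hpcs
      have hmaps : (((pcs.zip (pvFinalRows (pcs.zip rest))).map
            (fun cR => (cR.1, cR.2.getD t 0))).map (fun cv => d.getD cv.1 0 * cv.2)).sum
          = (((pcs.zip rest).zip (pvFinalRows (pcs.zip rest))).map
            (fun pr => d.getD pr.1.1 0 * pr.2.getD t 0)).sum := by
        simp only [List.map_map, Function.comp_def]
        exact congrArg List.sum htz.symm
      rw [hmaps]
      have hentry := pv_Rrows_entry L (pcs.zip rest) d t hps hdfacts.1
      rw [← hRh] at hentry
      have hcanon := (pvRrows_canon (pcs.zip rest) d hdfacts.2) t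
      rw [← hRh] at hcanon
      have : PySem.Int.mod (d.getD t 0 - (((pcs.zip rest).zip (pvFinalRows (pcs.zip rest))).map
            (fun pr => d.getD pr.1.1 0 * pr.2.getD t 0)).sum) pvMOD
          = PySem.Int.mod (Rh.getD t 0) pvMOD := by
        rw [PySem.Int.mod_eq_emod_of_pos (by norm_num [pvMOD]),
          PySem.Int.mod_eq_emod_of_pos (by norm_num [pvMOD])]
        exact hentry.symm
      rw [this, PySem.Int.mod_eq_emod_of_pos (by norm_num [pvMOD]),
        Int.emod_eq_of_lt hcanon.1 hcanon.2]

-- ===== VERDICT (by name: the statement is the Claim_ definition above) =====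
theorem linear_equations_spec : Claim_equal_linear_equations := by
  intro matrix vector _ hpre
  obtain ⟨hne, hvlen, hrowlen⟩ := hpre
  unfold Spec_linear_equations linear_equations linear_equations_alt
  simp only []
  have hinit : (List.range matrix.length).map (fun i => matrix.getD i [] ++ [vector.getD i 0]) =
      (matrix.zip vector).map (fun rb => rb.1 ++ [rb.2]) := by
    exact pv_map_range_zip (fun r b => r ++ [b]) matrix vector hvlen.symm
  rw [hinit]
  have hrel := pv_fold_rel matrix.length matrix.headI.length (List.range matrix.headI.length)
    ((matrix.zip vector).map (fun rb => rb.1 ++ [rb.2]), ([] : List Nat), ([] : List Nat), 0)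
    (([] : List (List Int)), (matrix.zip vector).map (fun rb => rb.1 ++ [rb.2]), ([] : List Nat), ([] : List Nat))
    ⟨rfl, rfl, rfl, rfl, rfl, by simp [List.length_zip, hvlen.symm], by simp, by
      intro r hr
      obtain ⟨rb, hrb, rfl⟩ := List.mem_map.mp hr
      have := List.of_mem_zip hrb
      simp [hrowlen rb.1 this.1]⟩
  rcases hstB : (List.range matrix.headI.length).foldl pvStepB
      (([] : List (List Int)), (matrix.zip vector).map (fun rb => rb.1 ++ [rb.2]), ([] : List Nat), ([] : List Nat))
    with ⟨done, pending, pivB, nopivB⟩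
  rcases hstA : (List.range matrix.headI.length).foldl (pvStepA matrix.length matrix.headI.length)
      ((matrix.zip vector).map (fun rb => rb.1 ++ [rb.2]), ([] : List Nat), ([] : List Nat), 0)
    with ⟨A, piv, nopiv, rank⟩
  rw [hstA, hstB] at hrel
  obtain ⟨hA, hpiv, hnopiv, hrank, hpivlen, hn, hdonefacts, hpendlen⟩ := hrel
  simp only at hA hpiv hnopiv hrank hpivlen hn hdonefacts hpendlen
  subst hA hpiv hnopiv hrank
  rw [hstA, hstB]
  simp only []
  set Adone := pvFinalRows (piv.zip done) with hAdone
  have hAdlen : Adone.length = done.length := by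
    rw [hAdone, pvFinalRows_length, List.length_zip, hpivlen, Nat.min_self]
  have hpivAd : piv.length = Adone.length := by rw [hAdlen]; exact hpivlen
  have hnsub : matrix.length - done.length = pending.length := by
    rw [← hn]; simp [hAdlen]
  have hany := pv_any_eq (fun r => r.getD matrix.headI.length 0 != 0) pending Adone
  rw [hAdlen] at hany
  have hgetd : ∀ i, i < Adone.length → pvGet2 (Adone ++ pending) i matrix.headI.length
      = (Adone.getD i []).getD matrix.headI.length 0 := by
    intro i hi
    unfold pvGet2
    rw [List.getD_append _ _ _ _ hi]
  have hres : List.foldl (fun res i => res.set (piv.getD i 0) (pvGet2 (Adone ++ pending) i matrix.headI.length))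
        (List.replicate matrix.headI.length 0) (List.range done.length)
      = List.foldl (fun res cr => res.set cr.1 (cr.2.getD matrix.headI.length 0))
        (List.replicate matrix.headI.length 0) (piv.zip Adone) := by
    rw [show List.range done.length = List.range piv.length from by rw [hpivlen]]
    rw [PySem.List.foldl_congr_mem _ _
      (fun res i => res.set (piv.getD i 0) ((Adone.getD i []).getD matrix.headI.length 0)) _
      (by intro acc x hx
          rw [hgetd x (by rw [hAdlen]; exact hpivlen ▸ List.mem_range.mp hx)])]
    exact pv_foldl_range_zip (fun (a : List Int) c r => a.set c (r.getD matrix.headI.length 0)) piv Adone _ hpivAd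
  have hbasis : (fun (bvs : List (List Int)) (i : Nat) => bvs ++
        [List.foldl (fun v j => v.set (piv.getD j 0) (PySem.Int.mod (-pvGet2 (Adone ++ pending) j i) pvMOD))
          ((List.replicate matrix.headI.length 0).set i 1) (List.range done.length)])
      = fun bvs c0 => bvs ++
        [List.foldl (fun v cr => v.set cr.1 (PySem.Int.mod (-cr.2.getD c0 0) pvMOD))
          ((List.replicate matrix.headI.length 0).set c0 1) (piv.zip Adone)] := by
    funext bvs c0
    congr 1
    rw [show List.range done.length = List.range piv.length from by rw [hpivlen]]
    rw [PySem.List.foldl_congr_mem _ _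
      (fun v j => v.set (piv.getD j 0) (PySem.Int.mod (-(Adone.getD j []).getD c0 0) pvMOD)) _
      (by intro acc x hx
          have hx' : x < Adone.length := by rw [hAdlen]; exact hpivlen ▸ List.mem_range.mp hx
          have : pvGet2 (Adone ++ pending) x c0 = (Adone.getD x []).getD c0 0 := by
            unfold pvGet2; rw [List.getD_append _ _ _ _ hx']
          rw [this])]
    exact congrArg (fun x => [x]) (pv_foldl_range_zip (fun (v : List Int) c r => v.set c (PySem.Int.mod (-(r.getD c0 0)) pvMOD)) piv Adone _ hpivAd)
  have hbs : ∀ t, pvBacksolve done piv t = (piv.zip Adone).map (fun cR => (cR.1, cR.2.getD t 0)) := by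
    intro t
    rw [hAdone]
    exact pv_backsolve_eq (matrix.headI.length + 1) done piv t hpivlen hdonefacts
  have hresB : (pvBacksolve done piv matrix.headI.length).foldl
        (fun res cv => res.set cv.1 cv.2) (List.replicate matrix.headI.length (0 : Int))
      = List.foldl (fun res cr => res.set cr.1 (cr.2.getD matrix.headI.length 0))
        (List.replicate matrix.headI.length 0) (piv.zip Adone) := by
    rw [hbs, List.foldl_map]
  have hbasisB : (fun (bvs : List (List Int)) (f : Nat) => bvs ++
        [(pvBacksolve done piv f).foldl (fun v cv => v.set cv.1 (PySem.Int.mod (-cv.2) pvMOD))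
          ((List.replicate matrix.headI.length 0).set f 1)])
      = fun bvs c0 => bvs ++
        [List.foldl (fun v cr => v.set cr.1 (PySem.Int.mod (-cr.2.getD c0 0) pvMOD))
          ((List.replicate matrix.headI.length 0).set c0 1) (piv.zip Adone)] := by
    funext bvs c0
    rw [hbs, List.foldl_map]
  rw [hnsub]
  simp only [pvGet2] at *
  rw [hany, hres, hbasis, hresB, hbasisB]
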